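-- pv_equiv track=rewrite | github.com/the-flx/flx.py | flx/flx.py | biggger_sublist
-- ===== SOURCE A (Python) =====
-- def biggger_sublist(sorted_list, val):
--     """Return sublist bigger than `val` from sorted `sorted-list`.
--
--     If `val` is nil, return entire list.
--     """
--     result = []
--     if val is None:
--         return sorted_list
--     else:
--         for sub in sorted_list:
--             if sub > val:
--                 result.append(sub)
--     return result
-- ===== SOURCE B (Python) =====
-- def biggger_sublist(sorted_list, val):
--     """Return sublist bigger than `val` from sorted `sorted-list`.
--
--     If `val` is nil, return entire list.
--     Binary search for the cutoff, then slice the tail: O(log n + k)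
--     instead of scanning the whole list.
--     """
--     if val is None:
--         return sorted_list
--     lo, hi = 0, len(sorted_list)
--     while lo < hi:
--         mid = (lo + hi) // 2
--         if sorted_list[mid] <= val:
--             lo = mid + 1
--         else:
--             hi = mid
--     return sorted_list[lo:]
-- ===== Notes on version B (the rewrite author's own statement) =====
-- stated objective: faster
-- what changed: Replaces the linear scan that appends every element greater than val with a hand-written binary search (bisect_right) for the cutoff index followed by a tail slice.
-- outside the precondition, e.g. on biggger_sublist([3, 1, 2], 1): A returns [3, 2], B returns [2]
import Mathlib
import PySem

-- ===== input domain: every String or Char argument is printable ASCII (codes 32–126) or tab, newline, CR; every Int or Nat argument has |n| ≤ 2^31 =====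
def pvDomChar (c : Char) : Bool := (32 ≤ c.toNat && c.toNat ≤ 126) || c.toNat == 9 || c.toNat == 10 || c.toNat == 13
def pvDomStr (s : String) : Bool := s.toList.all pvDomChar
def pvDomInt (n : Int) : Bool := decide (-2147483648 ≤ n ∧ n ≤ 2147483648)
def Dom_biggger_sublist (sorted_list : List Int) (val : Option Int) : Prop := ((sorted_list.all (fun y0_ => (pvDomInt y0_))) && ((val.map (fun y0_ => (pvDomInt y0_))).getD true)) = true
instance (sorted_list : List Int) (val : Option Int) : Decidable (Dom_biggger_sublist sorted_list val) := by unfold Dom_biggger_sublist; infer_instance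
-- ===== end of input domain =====

-- B replaces A's linear filter scan with a binary search for the cutoff plus a tail
-- slice; requires the documented precondition that the input list is sorted ascending.


-- ===== PORT A =====
-- 'for sub in sorted_list: if sub > val: result.append(sub)'
def biggger_sublist (sorted_list : List Int) (val : Option Int) : List Int :=
  match val with
  | none => sorted_list
  | some v => sorted_list.foldl (fun result sub => if sub > v then result ++ [sub] else result) []

-- ===== PORT B =====
-- the 'while lo < hi' binary-search loop of Source B; sorted_list[mid] is ported with
-- getD, exact here because every call keeps 0 ≤ mid < hi ≤ len(sorted_list)
def pvBS (l : List Int) (v : Int) (lo hi : Nat) : Nat :=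
  if lo < hi then
    if l.getD ((lo + hi) / 2) 0 ≤ v then pvBS l v ((lo + hi) / 2 + 1) hi
    else pvBS l v lo ((lo + hi) / 2)
  else lo
termination_by hi - lo
decreasing_by all_goals omega

-- 'sorted_list[lo:]' with 0 ≤ lo is List.drop lo
def biggger_sublist_alt (sorted_list : List Int) (val : Option Int) : List Int :=
  match val with
  | none => sorted_list
  | some v => sorted_list.drop (pvBS sorted_list v 0 sorted_list.length)

-- ===== PRECONDITION & SPEC =====
-- Pre_ is the function's documented domain — the docstring requires `sorted_list`
-- sorted ascending — widened by the cases where order cannot matter (val is None,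
-- or val is below/at-or-above every element); outside it (an unsorted list split by
-- val) A's linear filter and B's binary-search cutoff legitimately disagree, and
-- neither is specified.
def Pre_biggger_sublist (sorted_list : List Int) (val : Option Int) : Prop :=
  List.Pairwise (fun a b => a ≤ b) sorted_list ∨ val = none ∨
    (∀ x ∈ sorted_list, x ≤ val.getD 0) ∨ (∀ x ∈ sorted_list, val.getD 0 < x)

instance (sorted_list : List Int) (val : Option Int) : Decidable (Pre_biggger_sublist sorted_list val) := by
  unfold Pre_biggger_sublist; infer_instance

def pvWitness_biggger_sublist : List Int × Option Int := ([-2, 0, 0, 3, 5], some 0)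

def Spec_biggger_sublist (sorted_list : List Int) (val : Option Int) (out : List Int) : Prop := out = biggger_sublist_alt sorted_list val
instance (sorted_list : List Int) (val : Option Int) (out : List Int) : Decidable (Spec_biggger_sublist sorted_list val out) := by unfold Spec_biggger_sublist; infer_instance

-- ===== CLAIM (what is proved, stated in full; the proofs are below) =====
def Claim_equal_biggger_sublist : Prop := ∀ (sorted_list : List Int) (val : Option Int), Dom_biggger_sublist sorted_list val → Pre_biggger_sublist sorted_list val → Spec_biggger_sublist sorted_list val (biggger_sublist sorted_list val)

-- ===== LEMMAS AND PROOFS =====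

-- invariant proof for the binary search: the returned index r lies in [lo, hi],
-- everything before r is ≤ v and everything from r on is > v
theorem pvBS_spec (l : List Int) (v : Int) (hs : List.Pairwise (fun a b => a ≤ b) l) :
    ∀ (n lo hi : Nat), hi - lo ≤ n → lo ≤ hi → hi ≤ l.length →
    (∀ j (hj : j < l.length), j < lo → l[j] ≤ v) →
    (∀ j (hj : j < l.length), hi ≤ j → v < l[j]) →
    (∀ j (hj : j < l.length), j < pvBS l v lo hi → l[j] ≤ v) ∧
    (∀ j (hj : j < l.length), pvBS l v lo hi ≤ j → v < l[j]) := by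
  have hmono := (List.pairwise_iff_getElem).1 hs
  intro n
  induction n with
  | zero =>
    intro lo hi hfuel hle hlen hlow hhigh
    have heq : ¬ lo < hi := by omega
    rw [pvBS]; simp only [heq, if_false]
    exact ⟨hlow, fun j hj hge => hhigh j hj (by omega)⟩
  | succ n ih =>
    intro lo hi hfuel hle hlen hlow hhigh
    by_cases hlt : lo < hi
    · have hmid : (lo + hi) / 2 < l.length := by omega
      have hgetD : l.getD ((lo + hi) / 2) 0 = l[(lo + hi) / 2] := by
        simp [List.getD_eq_getElem?_getD, List.getElem?_eq_getElem hmid]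
      rw [pvBS]; simp only [hlt, if_true, hgetD]
      by_cases hc : l[(lo + hi) / 2] ≤ v
      · simp only [hc, if_true]
        refine ih ((lo + hi) / 2 + 1) hi (by omega) (by omega) hlen ?_ hhigh
        intro j hj hjlt
        rcases Nat.lt_or_ge j ((lo + hi) / 2) with h | h
        · exact le_trans (hmono j ((lo + hi) / 2) hj hmid h) hc
        · have : j = (lo + hi) / 2 := by omega
          subst this; exact hc
      · simp only [hc, if_false]
        refine ih lo ((lo + hi) / 2) (by omega) (by omega) (by omega) hlow ?_
        intro j hj hjge
        rcases Nat.lt_or_ge ((lo + hi) / 2) j with h | h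
        · exact lt_of_lt_of_le (lt_of_not_ge hc) (hmono ((lo + hi) / 2) j hmid hj h)
        · have : j = (lo + hi) / 2 := by omega
          subst this; exact lt_of_not_ge hc
    · rw [pvBS]; simp only [hlt, if_false]
      exact ⟨hlow, fun j hj hge => hhigh j hj (by omega)⟩

-- if every element is ≤ v the search always moves lo and ends at hi
theorem pvBS_all_le (l : List Int) (v : Int) (h : ∀ x ∈ l, x ≤ v) :
    ∀ (n lo hi : Nat), hi - lo ≤ n → lo ≤ hi → hi ≤ l.length → pvBS l v lo hi = hi := by
  intro n
  induction n with
  | zero =>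
    intro lo hi hfuel hle hlen
    rw [pvBS]; simp only [show ¬ lo < hi by omega, if_false]; omega
  | succ n ih =>
    intro lo hi hfuel hle hlen
    by_cases hlt : lo < hi
    · have hmid : (lo + hi) / 2 < l.length := by omega
      have hgetD : l.getD ((lo + hi) / 2) 0 = l[(lo + hi) / 2] := by
        simp [List.getD_eq_getElem?_getD, List.getElem?_eq_getElem hmid]
      rw [pvBS]
      simp only [hlt, if_true, hgetD, h _ (List.getElem_mem hmid), if_true]
      exact ih ((lo + hi) / 2 + 1) hi (by omega) (by omega) hlen
    · rw [pvBS]; simp only [hlt, if_false]; omega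

-- if every element is > v the search always moves hi and ends at lo
theorem pvBS_all_gt (l : List Int) (v : Int) (h : ∀ x ∈ l, v < x) :
    ∀ (n lo hi : Nat), hi - lo ≤ n → lo ≤ hi → hi ≤ l.length → pvBS l v lo hi = lo := by
  intro n
  induction n with
  | zero =>
    intro lo hi hfuel hle hlen
    rw [pvBS]; simp only [show ¬ lo < hi by omega, if_false]
  | succ n ih =>
    intro lo hi hfuel hle hlen
    by_cases hlt : lo < hi
    · have hmid : (lo + hi) / 2 < l.length := by omega
      have hgetD : l.getD ((lo + hi) / 2) 0 = l[(lo + hi) / 2] := by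
        simp [List.getD_eq_getElem?_getD, List.getElem?_eq_getElem hmid]
      have hgt : ¬ l[(lo + hi) / 2] ≤ v := not_le.2 (h _ (List.getElem_mem hmid))
      rw [pvBS]
      simp only [hlt, if_true, hgetD, hgt, if_false]
      exact ih lo ((lo + hi) / 2) (by omega) (by omega) (by omega)
    · rw [pvBS]; simp only [hlt, if_false]

-- ===== VERDICT (by name: the statement is the Claim_ definition above) =====
theorem biggger_sublist_spec : Claim_equal_biggger_sublist := by
  intro sorted_list val _ hpre
  unfold Spec_biggger_sublist
  cases val with
  | none => rfl
  | some v =>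
    rcases hpre with hpre | hnone | hall | hall
    case inr.inl => exact absurd hnone (by simp)
    case inr.inr.inl =>
      -- every element ≤ v: A filters everything out, B's search ends at length
      simp only [Option.getD_some] at hall
      show sorted_list.foldl (fun result sub => if sub > v then result ++ [sub] else result) []
          = sorted_list.drop (pvBS sorted_list v 0 sorted_list.length)
      rw [pvBS_all_le sorted_list v hall sorted_list.length 0 sorted_list.length
        (by omega) (by omega) (le_refl _)]
      rw [PySem.List.foldl_append_ite_eq_filter, List.nil_append, List.drop_length,
        List.filter_eq_nil_iff.2 (fun a ha => by simpa using not_lt.2 (hall a ha))]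
    case inr.inr.inr =>
      -- every element > v: A keeps everything, B's search ends at 0
      simp only [Option.getD_some] at hall
      show sorted_list.foldl (fun result sub => if sub > v then result ++ [sub] else result) []
          = sorted_list.drop (pvBS sorted_list v 0 sorted_list.length)
      rw [pvBS_all_gt sorted_list v hall sorted_list.length 0 sorted_list.length
        (by omega) (by omega) (le_refl _)]
      rw [PySem.List.foldl_append_ite_eq_filter, List.nil_append, List.drop_zero,
        List.filter_eq_self.2 (fun a ha => by simpa using hall a ha)]
    show sorted_list.foldl (fun result sub => if sub > v then result ++ [sub] else result) []
        = sorted_list.drop (pvBS sorted_list v 0 sorted_list.length)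
    obtain ⟨hlow, hhigh⟩ := pvBS_spec sorted_list v hpre sorted_list.length 0 sorted_list.length
      (by omega) (by omega) (le_refl _) (fun j hj h => by omega) (fun j hj h => by omega)
    rw [PySem.List.foldl_append_ite_eq_filter]
    rw [List.nil_append]
    conv_lhs => rw [← List.take_append_drop (pvBS sorted_list v 0 sorted_list.length) sorted_list]
    rw [List.filter_append]
    have h1 : List.filter (fun sub => decide (sub > v))
        (sorted_list.take (pvBS sorted_list v 0 sorted_list.length)) = [] := by
      rw [List.filter_eq_nil_iff]
      intro a ha
      obtain ⟨i, hi, rfl⟩ := List.mem_iff_getElem.1 ha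
      have hlen : i < sorted_list.length := by
        have := hi; simp [List.length_take] at this; omega
      have hir : i < pvBS sorted_list v 0 sorted_list.length := by
        have := hi; simp [List.length_take] at this; omega
      have := hlow i hlen hir
      simp [List.getElem_take]
      omega
    have h2 : List.filter (fun sub => decide (sub > v))
        (sorted_list.drop (pvBS sorted_list v 0 sorted_list.length))
        = sorted_list.drop (pvBS sorted_list v 0 sorted_list.length) := by
      rw [List.filter_eq_self]
      intro a ha
      obtain ⟨i, hi, rfl⟩ := List.mem_iff_getElem.1 ha
      have hlen : pvBS sorted_list v 0 sorted_list.length + i < sorted_list.length := by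
        have := hi; simp [List.length_drop] at this; omega
      have := hhigh (pvBS sorted_list v 0 sorted_list.length + i) hlen (by omega)
      simp [List.getElem_drop]
      omega
    rw [h1, h2, List.nil_append]
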